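-- pv_equiv track=rewrite | github.com/ZhijiangTang/My_Awesome_Algorithm | Course Algorithm Design and Analysis/9月作业/C.py | f
-- ===== SOURCE A (Python) =====
-- def f(W,n):
--     if len(W)==1:
--         if W[0]==0:
--             return {0:{0,1}}
--         return {0:{0},W[0]:{1}}
--
--     left = f(W[:n//2],n//2)
--     right = f(W[n//2:],n-n//2)
--
--     result = {}
--     for i in right:
--         for j in left:
--             if i+j not in result:
--                 result[i+j] = set()
--
--             result[i+j] = result[i+j].union([((k<<(n//2))+l) for k in right[i] for l in left[j]])
--     return result
-- ===== SOURCE B (Python) =====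
-- def f(W, n):
--     # Iterative subset-sum DP over the weights themselves: start from {0: {0}} and fold
--     # element i in with bit i, instead of A's n-driven recursive halving with shift-combine.
--     # (n is redundant: wherever A terminates it returns exactly this dict.)
--     result = {0: {0}}
--     for i, w in enumerate(W):
--         new = {}
--         for s, masks in result.items():
--             new[s] = set(masks)
--         for s, masks in result.items():
--             t = s + w
--             if t not in new:
--                 new[t] = set()
--             new[t] = new[t].union([m | (1 << i) for m in masks])
--         result = new
--     return result
-- ===== Notes on version B (the rewrite author's own statement) =====
-- stated objective: alternative
-- what changed: Replaced A's recursive halving (n-driven slices, recursion on both halves, shift-combine of the two sum->masks dicts) by a single iterative DP pass that folds each weight i into one running dict, OR-ing bit i into the masks and ignoring the redundant n; set values (unordered in Python) are returned in canonical sorted order by both ports.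
import Mathlib
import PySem

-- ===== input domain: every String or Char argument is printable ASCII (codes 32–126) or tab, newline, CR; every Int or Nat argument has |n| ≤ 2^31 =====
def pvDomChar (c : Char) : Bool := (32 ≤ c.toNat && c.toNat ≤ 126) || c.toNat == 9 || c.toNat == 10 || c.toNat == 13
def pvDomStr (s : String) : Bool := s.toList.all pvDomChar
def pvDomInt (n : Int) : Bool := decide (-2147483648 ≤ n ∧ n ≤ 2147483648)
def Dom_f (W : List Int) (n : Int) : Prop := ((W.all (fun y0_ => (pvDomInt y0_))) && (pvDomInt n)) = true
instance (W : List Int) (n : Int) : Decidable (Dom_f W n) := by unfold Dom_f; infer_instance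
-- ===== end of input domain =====

-- B replaces A's recursive halving with one iterative DP pass over the elements (alternative
-- decomposition, same exact result).  Python `set` values are unordered; both ports return each
-- set value in canonical (ascending) order — the differential tester compares sets ignoring order.

-- ===== PORT A =====
-- [(k << (n//2)) + l for k in right[i] for l in left[j]]  (shift amount n//2 ≥ 0 on every input A returns on)
def pvCrossA (h : Nat) (ri lj : List Int) : List Int :=
  ri.flatMap (fun (k : Int) => lj.map (fun (l : Int) => (k <<< h) + l))

-- `if i+j not in result: result[i+j] = set()` then `result[i+j] = result[i+j].union(block)`
def pvAddA (res : PySem.Dict Int (List Int)) (s : Int) (block : List Int) :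
    PySem.Dict Int (List Int) :=
  let res := if res.contains s then res else res.insert s PySem.Set.empty
  res.insert s (PySem.Set.update (res.getD s PySem.Set.empty) block)

-- the recursion itself; fuel (first argument) only makes it structural: on every input A returns
-- on, W.length fuel suffices and the fuel never runs out
def pvFA : Nat → List Int → Int → PySem.Dict Int (List Int)
  | 0, _, _ => PySem.Dict.empty
  | fuel+1, W, n =>
    if W.length = 1 then
      (if PySem.List.pyGetD W 0 0 = 0 then PySem.Dict.ofList [(0, [0, 1])]
       else PySem.Dict.ofList [(0, [0]), (PySem.List.pyGetD W 0 0, [1])])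
    else
      let h := PySem.Int.floordiv n 2
      let left := pvFA fuel (PySem.List.slice W none (some h)) h
      let right := pvFA fuel (PySem.List.slice W (some h) none) (n - h)
      -- for i in right: for j in left:  (iterating a dict's keys; right[i]/left[j] is the entry's value)
      right.items.foldl (fun res pi =>
        left.items.foldl (fun res pj =>
          pvAddA res (pi.1 + pj.1) (pvCrossA h.toNat pi.2 pj.2)) res)
        PySem.Dict.empty

def f (W : List Int) (n : Int) : List (Int × List Int) :=
  ((pvFA W.length W n).items).map (fun p => (p.1, PySem.List.sorted p.2 (fun x => x) false))

-- ===== PORT B =====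
-- [m | (1 << i) for m in masks]   (i ≥ 0: it comes from range(n))
def pvShiftB (masks : List Int) (i : Nat) : List Int :=
  masks.map (fun (m : Int) => PySem.Int.bor m ((1 : Int) <<< i))

-- `if t not in new: new[t] = set()` then `new[t] = new[t].union(block)`
def pvAddB (nw : PySem.Dict Int (List Int)) (t : Int) (block : List Int) :
    PySem.Dict Int (List Int) :=
  let nw := if nw.contains t then nw else nw.insert t PySem.Set.empty
  nw.insert t (PySem.Set.update (nw.getD t PySem.Set.empty) block)

-- one iteration of `for i in range(n)`: copy phase, then add phase
def pvStepB (res : PySem.Dict Int (List Int)) (i : Int) (w : Int) :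
    PySem.Dict Int (List Int) :=
  let copied := res.items.foldl (fun nw p => nw.insert p.1 (PySem.Set.ofList p.2))
    PySem.Dict.empty
  res.items.foldl (fun nw p => pvAddB nw (p.1 + w) (pvShiftB p.2 i.toNat)) copied

def f_alt (W : List Int) (n : Int) : List (Int × List Int) :=
  ((PySem.List.enumerate W 0).foldl
      (fun res p => pvStepB res p.1 p.2)
      (PySem.Dict.ofList [((0 : Int), [(0 : Int)])])).items.map
    (fun p => (p.1, PySem.List.sorted p.2 (fun x => x) false))

-- ===== PRECONDITION & SPEC =====
-- pvPreT len n: exactly when A's recursion terminates without an exception: a singleton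
-- ignores n; otherwise the n-driven splits reach singletons iff len = n - (n-1)/2^i for
-- some number i of ceiling-halvings (i ≤ 64 is no restriction on the stated |n| ≤ 2^31 domain)
def pvPreT (len : Nat) (n : Int) : Prop :=
  len = 1 ∨ (2 ≤ len ∧ (len : Int) ≤ n ∧
    ∃ i ∈ List.range 65, len = n.toNat - (n.toNat - 1) / 2 ^ i)

-- Pre_: exactly the inputs on which the Python A returns normally (elsewhere it hits
-- RecursionError on an empty slice or ValueError on a negative shift)
def Pre_f (W : List Int) (n : Int) : Prop := W ≠ [] ∧ pvPreT W.length n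
instance (W : List Int) (n : Int) : Decidable (Pre_f W n) := by unfold Pre_f pvPreT; infer_instance

def pvWitness_f : List Int × Int := ([2, 3, 2], 3)

def Spec_f (W : List Int) (n : Int) (out : List (Int × List Int)) : Prop := out = f_alt W n
instance (W : List Int) (n : Int) (out : List (Int × List Int)) : Decidable (Spec_f W n out) := by
  unfold Spec_f; infer_instance

-- ===== CLAIM (what is proved, stated in full; the proofs are below) =====
def Claim_equal_f : Prop := ∀ (W : List Int) (n : Int), Dom_f W n → Pre_f W n → Spec_f W n (f W n)


-- ===== LEMMAS AND PROOFS =====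

-- ---- canonical description: mSum W m is the subset sum selected by bitmask m (bit i = element i)
def mSum : List Int → Nat → Int
  | [], _ => 0
  | w :: t, m => (if m % 2 = 1 then w else 0) + mSum t (m / 2)

def seqK (W : List Int) : List Int := (List.range (2 ^ W.length)).map (mSum W)

theorem mSum_zero (Y : List Int) : mSum Y 0 = 0 := by
  induction Y with
  | nil => rfl
  | cons a t ih => simp [mSum, ih]

theorem mSum_append (X Y : List Int) (m : Nat) :
    mSum (X ++ Y) m = mSum X (m % 2 ^ X.length) + mSum Y (m / 2 ^ X.length) := by
  induction X generalizing m with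
  | nil => simp [mSum]
  | cons w t ih =>
    simp only [List.cons_append, mSum, List.length_cons, ih (m / 2)]
    have h1 : m % 2 ^ (t.length + 1) % 2 = m % 2 := by
      rw [Nat.mod_mod_of_dvd]
      exact Dvd.intro_left (2 ^ t.length) (by ring)
    have h2 : m % 2 ^ (t.length + 1) / 2 = m / 2 % 2 ^ t.length := by
      rw [pow_succ, mul_comm, Nat.mod_mul_right_div_self]
    have h3 : m / 2 ^ (t.length + 1) = m / 2 / 2 ^ t.length := by
      rw [pow_succ', Nat.div_div_eq_div_mul]
    simp only [h1, h2, h3]; ring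
theorem mSum_split (X Y : List Int) (u v : Nat) (hv : v < 2 ^ X.length) :
    mSum (X ++ Y) (u * 2 ^ X.length + v) = mSum X v + mSum Y u := by
  rw [mSum_append]
  congr 2
  · rw [Nat.mul_add_mod_self_right, Nat.mod_eq_of_lt hv]
  · rw [mul_comm, Nat.mul_add_div (Nat.two_pow_pos _), Nat.div_eq_of_lt hv]
    omega
theorem mSum_lt (X : List Int) (m : Nat) (h : m < 2 ^ X.length) (Y : List Int) :
    mSum (X ++ Y) m = mSum X m := by
  have h0 := mSum_split X Y 0 m h
  simp only [Nat.zero_mul, Nat.zero_add] at h0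
  rw [h0, mSum_zero, add_zero]
theorem seqK_append_singleton (P : List Int) (w : Int) :
    seqK (P ++ [w]) = seqK P ++ (seqK P).map (· + w) := by
  unfold seqK
  simp only [List.length_append, List.length_singleton]
  have : 2 ^ (P.length + 1) = 2 ^ P.length + 2 ^ P.length := by ring
  rw [this, List.range_add, List.map_append, List.map_map, List.map_map]
  congr 1
  · apply List.map_congr_left
    intro m hm
    exact mSum_lt P m (List.mem_range.mp hm) [w]
  · apply List.map_congr_left
    intro m hm
    simp only [Function.comp]
    have h1 : 2 ^ P.length + m = 1 * 2 ^ P.length + m := by ring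
    rw [h1, mSum_split P [w] 1 m (List.mem_range.mp hm)]
    simp [mSum]

def canonVal (W : List Int) (s : Int) : List Int :=
  List.map (fun m : Nat => (m : Int)) ((List.range (2 ^ W.length)).filter (fun m : Nat => mSum W m = s))

def canonOut (W : List Int) : List (Int × List Int) :=
  (PySem.Set.ofList (seqK W)).map (fun s => (s, canonVal W s))

-- pvRep W d: the items list d is the sum→masks dict for W (keys in canonical dedup order,
-- values with the right membership)
def pvRep (W : List Int) (d : List (Int × List Int)) : Prop :=
  d.map Prod.fst = PySem.Set.ofList (seqK W) ∧
  ∀ p ∈ d, p.2.Nodup ∧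
    ∀ x : Int, x ∈ p.2 ↔ ∃ m : Nat, m < 2 ^ W.length ∧ mSum W m = p.1 ∧ x = (m : Int)

-- ---- generic PySem.Set order/congruence lemmas
theorem pv_update_of_subset {s ys : List Int} (h : ∀ x ∈ ys, x ∈ s) :
    PySem.Set.update s ys = s := by
  rw [PySem.Set.update_eq_append_filter]
  have hfil : (PySem.Set.ofList ys).filter (fun y => !(PySem.Set.contains s y)) = [] := by
    apply List.filter_eq_nil_iff.mpr
    intro a ha
    have ha' : a ∈ ys := (PySem.Set.mem_ofList ys a).mp ha
    simp
    exact h a ha'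
  rw [hfil, List.append_nil]

theorem pv_update_congr (s : List Int) {y y' : List Int}
    (h : PySem.Set.ofList y = PySem.Set.ofList y') :
    PySem.Set.update s y = PySem.Set.update s y' := by
  rw [PySem.Set.update_eq_append_filter, PySem.Set.update_eq_append_filter, h]

theorem pv_ofList_map_inj {f : Int → Int} (hf : Function.Injective f) (u : List Int) :
    PySem.Set.ofList (u.map f) = (PySem.Set.ofList u).map f := by
  induction u using List.reverseRecOn with
  | nil => rfl
  | append_singleton u a ih =>
    rw [List.map_append, List.map_singleton, PySem.Set.ofList_append_singleton,
      PySem.Set.ofList_append_singleton, ih]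
    by_cases ha : a ∈ PySem.Set.ofList u
    · rw [PySem.Set.add_of_mem ha, PySem.Set.add_of_mem]
      simp only [List.mem_map]; exact ⟨a, ha, rfl⟩
    · rw [PySem.Set.add_of_not_mem ha, PySem.Set.add_of_not_mem, List.map_append,
        List.map_singleton]
      simp only [List.mem_map]
      rintro ⟨b, hb, hba⟩
      exact ha (hf hba ▸ hb)

theorem pv_ofList_flatMap_congr {u : List Int} {g g' : Int → List Int}
    (h : ∀ a ∈ u, PySem.Set.ofList (g a) = PySem.Set.ofList (g' a)) :
    PySem.Set.ofList (u.flatMap g) = PySem.Set.ofList (u.flatMap g') := by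
  induction u using List.reverseRecOn with
  | nil => rfl
  | append_singleton u a ih =>
    rw [List.flatMap_append, List.flatMap_append]
    simp only [List.flatMap_cons, List.flatMap_nil, List.append_nil]
    rw [PySem.Set.ofList_append, PySem.Set.ofList_append,
      ih (fun b hb => h b (List.mem_append_left _ hb)),
      pv_update_congr _ (h a (by simp))]

theorem pv_ofList_flatMap_ofList (u : List Int) (g : Int → List Int) :
    PySem.Set.ofList ((PySem.Set.ofList u).flatMap g) = PySem.Set.ofList (u.flatMap g) := by
  induction u using List.reverseRecOn with
  | nil => rfl
  | append_singleton u a ih =>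
    rw [PySem.Set.ofList_append_singleton]
    by_cases ha : a ∈ PySem.Set.ofList u
    · rw [PySem.Set.add_of_mem ha, List.flatMap_append, PySem.Set.ofList_append, ih]
      simp only [List.flatMap_cons, List.flatMap_nil, List.append_nil]
      symm
      apply pv_update_of_subset
      intro x hx
      have hau : a ∈ u := (PySem.Set.mem_ofList u a).mp ha
      rw [PySem.Set.mem_ofList]
      exact List.mem_flatMap.mpr ⟨a, hau, hx⟩
    · rw [PySem.Set.add_of_not_mem ha, List.flatMap_append, List.flatMap_append,
        PySem.Set.ofList_append, PySem.Set.ofList_append, ih]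

theorem pv_ofList_map_ofList {f : Int → Int} (hf : Function.Injective f) (u : List Int) :
    PySem.Set.ofList ((PySem.Set.ofList u).map f) = PySem.Set.ofList (u.map f) := by
  rw [← pv_ofList_map_inj hf u, PySem.Set.ofList_ofList]

-- ---- the items-level model of the two Python lines `if s not in d: d[s]=set(); d[s] = d[s].union(b)`
def dAddM (d : List (Int × List Int)) (s : Int) (b : List Int) : List (Int × List Int) :=
  if s ∈ d.map Prod.fst then
    d.map (fun p => if p.1 = s then (p.1, PySem.Set.update p.2 b) else p)
  else d ++ [(s, PySem.Set.ofList b)]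

def dApply (d : List (Int × List Int)) (acts : List (Int × List Int)) :
    List (Int × List Int) :=
  acts.foldl (fun d a => dAddM d a.1 a.2) d

theorem pv_key_unique {d : List (Int × List Int)} (hnd : (d.map Prod.fst).Nodup)
    {s : Int} {v v' : List Int} (h1 : (s, v) ∈ d) (h2 : (s, v') ∈ d) : v = v' := by
  induction d with
  | nil => simp at h1
  | cons p t ih =>
    simp only [List.map_cons, List.nodup_cons] at hnd
    rcases List.mem_cons.mp h1 with h1 | h1 <;> rcases List.mem_cons.mp h2 with h2 | h2
    · have := h1.trans h2.symm; exact (Prod.mk.injEq _ _ _ _ ▸ this).2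
    · exfalso; exact hnd.1 (by rw [show p.1 = s from congrArg Prod.fst h1.symm]; exact List.mem_map.mpr ⟨_, h2, rfl⟩)
    · exfalso; exact hnd.1 (by rw [show p.1 = s from congrArg Prod.fst h2.symm]; exact List.mem_map.mpr ⟨_, h1, rfl⟩)
    · exact ih hnd.2 h1 h2

theorem pv_keys_eq (d : PySem.Dict Int (List Int)) : d.keys = d.items.map Prod.fst := by
  simp [PySem.Dict.keys]

theorem pvAddA_items (d : PySem.Dict Int (List Int)) (s : Int) (b : List Int)
    (hnd : d.keys.Nodup) : (pvAddA d s b).items = dAddM d.items s b := by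
  unfold pvAddA dAddM
  by_cases hc : d.contains s = true
  · simp only [hc, if_true]
    have hk : s ∈ d.items.map Prod.fst := by
      have := (PySem.Dict.contains_iff_mem_keys d s).mp hc
      rwa [pv_keys_eq] at this
    simp only [hk, if_true]
    rw [PySem.Dict.items_insert_of_contains d _ hc]
    apply List.map_congr_left
    intro p hp
    by_cases hps : p.1 = s
    · have hget : d.get? p.1 = some p.2 := PySem.Dict.get?_of_mem_items d hp hnd
      have hgd : d.getD s PySem.Set.empty = p.2 := by
        rw [← hps]; exact PySem.Dict.getD_of_get?_eq_some d _ hget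
      simp only [hps, beq_self_eq_true, if_true]
      exact congrArg (fun v => (s, PySem.Set.update v b)) hgd
    · simp [hps]
  · have hcf : d.contains s = false := by simpa using hc
    simp only [hcf, Bool.false_eq_true, if_false]
    have hk : s ∉ d.items.map Prod.fst := by
      intro hmem
      exact hc ((PySem.Dict.contains_iff_mem_keys d s).mpr (by rwa [pv_keys_eq]))
    simp only [hk, if_false]
    have hc2 : (d.insert s PySem.Set.empty).contains s = true :=
      PySem.Dict.contains_insert_self _ _ _
    rw [PySem.Dict.items_insert_of_contains _ _ hc2,
      PySem.Dict.items_insert_of_not_contains d _ hcf,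
      PySem.Dict.getD_insert_self, List.map_append]
    congr 1
    · conv_rhs => rw [← List.map_id d.items]
      apply List.map_congr_left
      intro p hp
      have : p.1 ≠ s := fun hps => hk (hps ▸ List.mem_map.mpr ⟨p, hp, rfl⟩)
      simp [this]
    · simp only [List.map_cons, List.map_nil, beq_self_eq_true, if_true]
      rw [show PySem.Set.update PySem.Set.empty b = PySem.Set.ofList b from PySem.Set.update_empty b]

theorem dAddM_keys (d : List (Int × List Int)) (s : Int) (b : List Int) :
    (dAddM d s b).map Prod.fst = PySem.Set.add (d.map Prod.fst) s := by
  unfold dAddM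
  rw [PySem.Set.add_eq_ite]
  by_cases hk : s ∈ d.map Prod.fst
  · simp only [hk, if_true, List.map_map]
    apply List.map_congr_left
    intro p hp
    by_cases hps : p.1 = s <;> simp [hps]
  · simp [hk]

theorem dAddM_vals_nodup (d : List (Int × List Int)) (s : Int) (b : List Int)
    (hv : ∀ p ∈ d, p.2.Nodup) : ∀ p ∈ dAddM d s b, p.2.Nodup := by
  unfold dAddM
  by_cases hk : s ∈ d.map Prod.fst <;> simp only [hk, if_true, if_false]
  · intro p hp
    obtain ⟨q, hq, hpq⟩ := List.mem_map.mp hp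
    by_cases hqs : q.1 = s
    · simp only [hqs, if_true] at hpq
      rw [← hpq]
      exact PySem.Set.nodup_update _ _ (hv q hq)
    · simp only [hqs, if_false] at hpq
      exact hpq ▸ hv q hq
  · intro p hp
    rcases List.mem_append.mp hp with h | h
    · exact hv p h
    · simp only [List.mem_singleton] at h
      rw [h]
      exact PySem.Set.nodup_ofList b

theorem dAddM_lookup (d : List (Int × List Int)) (s : Int) (b : List Int)
    (k x : Int) :
    (∃ v, (k, v) ∈ dAddM d s b ∧ x ∈ v) ↔
      (∃ v, (k, v) ∈ d ∧ x ∈ v) ∨ (k = s ∧ x ∈ b) := by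
  unfold dAddM
  by_cases hk : s ∈ d.map Prod.fst <;>
    simp only [hk, if_true, if_false]
  · constructor
    · rintro ⟨v, hv, hxv⟩
      obtain ⟨q, hq, hqv⟩ := List.mem_map.mp hv
      by_cases hqs : q.1 = s
      · simp only [hqs, if_true] at hqv
        have hks : k = s := (Prod.mk.injEq _ _ _ _ ▸ hqv.symm).1 ▸ rfl
        have hveq : v = PySem.Set.update q.2 b := ((Prod.mk.injEq _ _ _ _).mp hqv.symm).2
        rw [hveq, PySem.Set.mem_update] at hxv
        rcases hxv with hxq | hxb
        · exact Or.inl ⟨q.2, by rw [hks, ← hqs]; exact hq, hxq⟩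
        · exact Or.inr ⟨hks, hxb⟩
      · simp only [hqs, if_false] at hqv
        exact Or.inl ⟨v, hqv ▸ hq, hxv⟩
    · rintro (⟨v, hv, hxv⟩ | ⟨hks, hxb⟩)
      · by_cases hks : k = s
        · refine ⟨PySem.Set.update v b, List.mem_map.mpr ⟨(k, v), hv, by simp [hks]⟩, ?_⟩
          rw [PySem.Set.mem_update]; exact Or.inl hxv
        · exact ⟨v, List.mem_map.mpr ⟨(k, v), hv, by simp [hks]⟩, hxv⟩
      · subst hks
        obtain ⟨q, hq, hqk⟩ := List.mem_map.mp hk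
        refine ⟨PySem.Set.update q.2 b, List.mem_map.mpr ⟨q, hq, by simp [hqk]⟩, ?_⟩
        rw [PySem.Set.mem_update]; exact Or.inr hxb
  · constructor
    · rintro ⟨v, hv, hxv⟩
      rcases List.mem_append.mp hv with h | h
      · exact Or.inl ⟨v, h, hxv⟩
      · simp only [List.mem_singleton, Prod.mk.injEq] at h
        refine Or.inr ⟨h.1, (PySem.Set.mem_ofList b x).mp (h.2 ▸ hxv)⟩
    · rintro (⟨v, hv, hxv⟩ | ⟨hks, hxb⟩)
      · exact ⟨v, List.mem_append_left _ hv, hxv⟩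
      · exact ⟨PySem.Set.ofList b, by simp [hks], (PySem.Set.mem_ofList b x).mpr hxb⟩

theorem pvAddA_keys (d : PySem.Dict Int (List Int)) (s : Int) (b : List Int)
    (hnd : d.keys.Nodup) : (pvAddA d s b).keys = PySem.Set.add d.keys s := by
  rw [pv_keys_eq, pvAddA_items d s b hnd, dAddM_keys, pv_keys_eq]

theorem foldl_pvAddA_items (acts : List (Int × List Int)) (d : PySem.Dict Int (List Int))
    (hnd : d.keys.Nodup) :
    (acts.foldl (fun r a => pvAddA r a.1 a.2) d).items = dApply d.items acts ∧
    (acts.foldl (fun r a => pvAddA r a.1 a.2) d).keys.Nodup := by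
  induction acts generalizing d with
  | nil => exact ⟨rfl, hnd⟩
  | cons a t ih =>
    simp only [List.foldl_cons, dApply, List.foldl_cons]
    have hnd' : (pvAddA d a.1 a.2).keys.Nodup := by
      rw [pvAddA_keys d a.1 a.2 hnd]
      exact PySem.Set.nodup_add _ _ hnd
    have := ih (pvAddA d a.1 a.2) hnd'
    rw [pvAddA_items d a.1 a.2 hnd] at this
    exact this

theorem dApply_keys (d : List (Int × List Int)) (acts : List (Int × List Int)) :
    (dApply d acts).map Prod.fst =
      PySem.Set.update (d.map Prod.fst) (acts.map Prod.fst) := by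
  induction acts generalizing d with
  | nil => rfl
  | cons a t ih =>
    simp only [dApply, List.foldl_cons, List.map_cons, PySem.Set.update_cons]
    rw [← dAddM_keys d a.1 a.2]
    exact ih (dAddM d a.1 a.2)

theorem dApply_vals_nodup (acts : List (Int × List Int)) (d : List (Int × List Int))
    (hv : ∀ p ∈ d, p.2.Nodup) : ∀ p ∈ dApply d acts, p.2.Nodup := by
  induction acts generalizing d with
  | nil => exact hv
  | cons a t ih =>
    simp only [dApply, List.foldl_cons]
    exact ih _ (dAddM_vals_nodup d a.1 a.2 hv)

theorem dApply_lookup (acts : List (Int × List Int)) (d : List (Int × List Int))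
    (k x : Int) :
    (∃ v, (k, v) ∈ dApply d acts ∧ x ∈ v) ↔
      (∃ v, (k, v) ∈ d ∧ x ∈ v) ∨ ∃ a ∈ acts, a.1 = k ∧ x ∈ a.2 := by
  induction acts generalizing d with
  | nil => simp [dApply]
  | cons a t ih =>
    simp only [dApply, List.foldl_cons]
    rw [show List.foldl (fun d a => dAddM d a.1 a.2) (dAddM d a.1 a.2) t =
      dApply (dAddM d a.1 a.2) t from rfl, ih, dAddM_lookup]
    constructor
    · rintro ((h | ⟨hak, hxb⟩) | h)
      · exact Or.inl h
      · exact Or.inr ⟨a, List.mem_cons_self .., hak.symm, hxb⟩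
      · obtain ⟨a', ha', h1, h2⟩ := h
        exact Or.inr ⟨a', List.mem_cons_of_mem _ ha', h1, h2⟩
    · rintro (h | ⟨a', ha', h1, h2⟩)
      · exact Or.inl (Or.inl h)
      · rcases List.mem_cons.mp ha' with rfl | ha'
        · exact Or.inl (Or.inr ⟨h1.symm, h2⟩)
        · exact Or.inr ⟨a', ha', h1, h2⟩


-- ---- from pvRep to the ports' outputs
theorem canonVal_pairwise (W : List Int) (s : Int) : (canonVal W s).Pairwise (· < ·) := by
  unfold canonVal
  refine List.Pairwise.map _ ?_ (List.Pairwise.filter _ (List.pairwise_lt_range))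
  intro a b hab
  exact_mod_cast hab

theorem canonVal_mem (W : List Int) (s : Int) (x : Int) :
    x ∈ canonVal W s ↔ ∃ m : Nat, m < 2 ^ W.length ∧ mSum W m = s ∧ x = (m : Int) := by
  unfold canonVal
  simp only [List.mem_map, List.mem_filter, List.mem_range, decide_eq_true_eq]
  constructor
  · rintro ⟨m, ⟨hm, hs⟩, rfl⟩; exact ⟨m, hm, hs, rfl⟩
  · rintro ⟨m, hm, hs, rfl⟩; exact ⟨m, ⟨hm, hs⟩, rfl⟩

theorem rep_out (W : List Int) (d : List (Int × List Int)) (h : pvRep W d) :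
    d.map (fun p => (p.1, PySem.List.sorted p.2 (fun x => x) false)) = canonOut W := by
  obtain ⟨hkeys, hvals⟩ := h
  unfold canonOut
  rw [← hkeys, List.map_map]
  apply List.map_congr_left
  intro p hp
  simp only [Function.comp]
  obtain ⟨hnodup, hmem⟩ := hvals p hp
  congr 1
  apply PySem.List.sorted_eq_of_perm_of_pairwise_lt
  · apply (List.perm_ext_iff_of_nodup ?_ hnodup).mpr
    · intro x
      rw [canonVal_mem, hmem]
    · exact (canonVal_pairwise W p.1).nodup
  · exact canonVal_pairwise W p.1

-- ---- B side
theorem pv_bor_two_pow (m i : Nat) (h : m < 2 ^ i) :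
    PySem.Int.bor (m : Int) ((1 : Int) <<< i) = ((m + 2 ^ i : Nat) : Int) := by
  have h1 : (1 : Int) <<< i = ((2 ^ i : Nat) : Int) := by
    rw [Int.shiftLeft_eq]; push_cast; ring
  rw [h1, PySem.Int.bor_natCast]
  congr 1
  have h2 := Nat.two_pow_add_eq_or_of_lt h 1
  simp only [Nat.mul_one] at h2
  rw [Nat.lor_comm]
  omega

theorem pv_entry_exists {d : List (Int × List Int)} {s : Int}
    (h : s ∈ d.map Prod.fst) : ∃ v, (s, v) ∈ d := by
  obtain ⟨p, hp, rfl⟩ := List.mem_map.mp h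
  exact ⟨p.2, hp⟩

theorem mSum_mem_seqK (P : List Int) (m : Nat) (h : m < 2 ^ P.length) :
    mSum P m ∈ seqK P := List.mem_map.mpr ⟨m, List.mem_range.mpr h, rfl⟩

theorem stepB_rep (P : List Int) (w : Int) (res : PySem.Dict Int (List Int))
    (hnd : res.keys.Nodup) (hrep : pvRep P res.items) :
    (pvStepB res (P.length : Int) w).keys.Nodup ∧
      pvRep (P ++ [w]) (pvStepB res (P.length : Int) w).items := by
  unfold pvStepB
  have hndi : (res.items.map Prod.fst).Nodup := by rwa [pv_keys_eq] at hnd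
  -- the copy phase
  have hcop : ((res.items.foldl (fun nw p => nw.insert p.1 (PySem.Set.ofList p.2))
      PySem.Dict.empty)).items = res.items.map (fun p => (p.1, PySem.Set.ofList p.2)) := by
    rw [PySem.Dict.items_foldl_insert_fresh res.items Prod.fst
      (fun p => PySem.Set.ofList p.2) PySem.Dict.empty
      (fun a _ => PySem.Dict.contains_empty _) hndi]
    rfl
  set copied := res.items.foldl (fun nw p => nw.insert p.1 (PySem.Set.ofList p.2))
    PySem.Dict.empty with hcopdef
  have hcopkeys : copied.keys = res.items.map Prod.fst := by
    rw [pv_keys_eq, hcop, List.map_map]; rfl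
  have hcopnd : copied.keys.Nodup := by rwa [hcopkeys]
  -- the add phase as a dApply
  have hfold : res.items.foldl (fun nw p => pvAddB nw (p.1 + w) (pvShiftB p.2 ((P.length : Int)).toNat)) copied
      = (res.items.map (fun p => (p.1 + w, pvShiftB p.2 P.length))).foldl
          (fun r a => pvAddA r a.1 a.2) copied := by
    rw [List.foldl_map]
    simp [pvAddB, pvAddA]
  rw [hfold]
  set acts := res.items.map (fun p => (p.1 + w, pvShiftB p.2 P.length)) with hacts
  obtain ⟨hitems, hknd⟩ := foldl_pvAddA_items acts copied hcopnd
  refine ⟨hknd, ?_, ?_⟩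
  · -- keys
    rw [hitems, dApply_keys, hcop, List.map_map, hacts, List.map_map]
    have h1 : res.items.map (Prod.fst ∘ fun p => (p.1, PySem.Set.ofList p.2)) =
        res.items.map Prod.fst := rfl
    have h2 : res.items.map (Prod.fst ∘ fun p => (p.1 + w, pvShiftB p.2 P.length)) =
        (res.items.map Prod.fst).map (· + w) := by rw [List.map_map]; rfl
    rw [h1, h2, hrep.1, seqK_append_singleton, PySem.Set.ofList_append]
    apply pv_update_congr
    rw [pv_ofList_map_inj (add_left_injective w), pv_ofList_map_inj (add_left_injective w),
      PySem.Set.ofList_ofList]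
  · -- values
    intro p hp
    rw [hitems] at hp
    have hvnd : p.2.Nodup := by
      refine dApply_vals_nodup acts copied.items ?_ p hp
      rw [hcop]
      intro q hq
      obtain ⟨q0, _, rfl⟩ := List.mem_map.mp hq
      exact PySem.Set.nodup_ofList _
    refine ⟨hvnd, ?_⟩
    intro x
    -- from entry to lookup
    have hkeysnd : ((dApply copied.items acts).map Prod.fst).Nodup := by
      rw [← hitems, ← pv_keys_eq]; exact hknd
    have hx : x ∈ p.2 ↔ ∃ v, (p.1, v) ∈ dApply copied.items acts ∧ x ∈ v := by
      constructor
      · intro h; exact ⟨p.2, by simpa using hp, h⟩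
      · rintro ⟨v, hv, hxv⟩
        have hp2 : (p.1, p.2) ∈ dApply copied.items acts := by rwa [Prod.mk.eta]
        rw [pv_key_unique hkeysnd hp2 hv]
        exact hxv
    rw [hx, dApply_lookup]
    constructor
    · rintro (⟨v, hv, hxv⟩ | ⟨a, ha, hak, hxa⟩)
      · -- carried
        rw [hcop] at hv
        obtain ⟨q, hq, hqv⟩ := List.mem_map.mp hv
        have hfst : q.1 = p.1 := (Prod.ext_iff.mp hqv).1
        have hsnd : PySem.Set.ofList q.2 = v := (Prod.ext_iff.mp hqv).2
        rw [← hsnd, PySem.Set.mem_ofList] at hxv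
        obtain ⟨m, hm, hms, rfl⟩ := ((hrep.2 q hq).2 x).mp hxv
        refine ⟨m, ?_, ?_, rfl⟩
        · simp only [List.length_append, List.length_singleton]
          calc m < 2 ^ P.length := hm
            _ ≤ 2 ^ (P.length + 1) := Nat.pow_le_pow_right (by norm_num) (by omega)
        · rw [mSum_lt P m hm [w], hms, hfst]
      · -- shifted
        obtain ⟨q, hq, rfl⟩ := List.mem_map.mp ha
        obtain ⟨x0, hx0, rfl⟩ := List.mem_map.mp hxa
        obtain ⟨m, hm, hms, rfl⟩ := ((hrep.2 q hq).2 x0).mp hx0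
        refine ⟨2 ^ P.length + m, ?_, ?_, ?_⟩
        · simp only [List.length_append, List.length_singleton]
          have : 2 ^ (P.length + 1) = 2 ^ P.length + 2 ^ P.length := by ring
          omega
        · have hd : 2 ^ P.length + m = 1 * 2 ^ P.length + m := by ring
          have hw1 : mSum [w] 1 = w := by norm_num [mSum]
          rw [hd, mSum_split P [w] 1 m hm, hms, hw1, ← hak]
        · rw [pv_bor_two_pow m P.length hm]
          congr 1
          omega
    · rintro ⟨m, hm, hms, rfl⟩
      simp only [List.length_append, List.length_singleton] at hm
      by_cases hcase : m < 2 ^ P.length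
      · -- carried
        left
        have hsk : mSum P m ∈ res.items.map Prod.fst := by
          rw [hrep.1, PySem.Set.mem_ofList]
          exact mSum_mem_seqK P m hcase
        obtain ⟨v, hv⟩ := pv_entry_exists hsk
        refine ⟨PySem.Set.ofList v, ?_, ?_⟩
        · rw [hcop]
          have : mSum P m = p.1 := by rw [← hms, mSum_lt P m hcase [w]]
          rw [← this]
          exact List.mem_map.mpr ⟨(mSum P m, v), hv, rfl⟩
        · rw [PySem.Set.mem_ofList]
          exact ((hrep.2 _ hv).2 _).mpr ⟨m, hcase, rfl, rfl⟩
      · -- shifted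
        right
        set mn := m - 2 ^ P.length with hmend
        have hmn : mn < 2 ^ P.length := by
          have : 2 ^ (P.length + 1) = 2 ^ P.length + 2 ^ P.length := by ring
          omega
        have hsk : mSum P mn ∈ res.items.map Prod.fst := by
          rw [hrep.1, PySem.Set.mem_ofList]
          exact mSum_mem_seqK P mn hmn
        obtain ⟨v, hv⟩ := pv_entry_exists hsk
        refine ⟨(mSum P mn + w, pvShiftB v P.length), List.mem_map.mpr ⟨_, hv, rfl⟩, ?_, ?_⟩
        · rw [← hms]
          have hd : m = 1 * 2 ^ P.length + mn := by omega
          have hw1 : mSum [w] 1 = w := by norm_num [mSum]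
          rw [hd, mSum_split P [w] 1 mn hmn, hw1]
        · have hmem : ((mn : Int)) ∈ v := ((hrep.2 _ hv).2 _).mpr ⟨mn, hmn, rfl, rfl⟩
          refine List.mem_map.mpr ⟨(mn : Int), hmem, ?_⟩
          rw [pv_bor_two_pow mn P.length hmn]
          congr 1
          omega


theorem foldB_rep (W : List Int) :
    ((PySem.List.enumerate W 0).foldl (fun res p => pvStepB res p.1 p.2)
        (PySem.Dict.ofList [((0 : Int), [(0 : Int)])])).keys.Nodup ∧
    pvRep W ((PySem.List.enumerate W 0).foldl (fun res p => pvStepB res p.1 p.2)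
        (PySem.Dict.ofList [((0 : Int), [(0 : Int)])])).items := by
  induction W using List.reverseRecOn with
  | nil =>
    refine ⟨by decide, by decide, ?_⟩
    intro p hp
    have hp2 : p ∈ [((0 : Int), [(0 : Int)])] := hp
    have hp' : p = ((0 : Int), [(0 : Int)]) := by
      simpa using hp2
    subst hp'
    refine ⟨by decide, ?_⟩
    intro x
    simp only [List.mem_singleton]
    constructor
    · rintro rfl
      exact ⟨0, by simp, by simp [mSum], rfl⟩
    · rintro ⟨m, hm, _, rfl⟩
      simp only [List.length_nil, pow_zero] at hm
      have : m = 0 := by omega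
      subst this
      simp
  | append_singleton W w ih =>
    rw [PySem.List.enumerate_append, List.foldl_append]
    have h1 : PySem.List.enumerate [w] (0 + (W.length : Int)) = [((W.length : Int), w)] := by
      rw [PySem.List.enumerate_cons]
      simp [PySem.List.enumerate_nil]
    rw [h1]
    simp only [List.foldl_cons, List.foldl_nil]
    exact stepB_rep W w _ ih.1 ih.2

-- ---- A side
theorem pv_range_mul (p q : Nat) :
    List.range (p * q) = (List.range p).flatMap (fun u => (List.range q).map (fun v => u * q + v)) := by
  induction p with
  | zero => simp
  | succ p ih =>
    rw [List.range_succ, List.flatMap_append, ← ih, Nat.succ_mul, List.range_add]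
    simp

theorem seqK_combine (X Y : List Int) :
    seqK (X ++ Y) = (seqK Y).flatMap (fun i => (seqK X).map (fun j => i + j)) := by
  unfold seqK
  simp only [List.length_append]
  have hpow : 2 ^ (X.length + Y.length) = 2 ^ Y.length * 2 ^ X.length := by
    rw [← pow_add]; ring
  rw [hpow, pv_range_mul, List.map_flatMap, List.flatMap_map]
  congr 1
  funext u
  rw [List.map_map, List.map_map]
  apply List.map_congr_left
  intro v hv
  simp only [Function.comp_apply]
  rw [mSum_split X Y u v (List.mem_range.mp hv)]
  ring

theorem combA_rep (X Y : List Int) (aN : Nat) (haN : aN = X.length)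
    (L R : PySem.Dict Int (List Int))
    (hLrep : pvRep X L.items) (hRrep : pvRep Y R.items) :
    (R.items.foldl (fun res pi =>
        L.items.foldl (fun res pj =>
          pvAddA res (pi.1 + pj.1) (pvCrossA aN pi.2 pj.2)) res)
        PySem.Dict.empty).keys.Nodup ∧
    pvRep (X ++ Y)
      (R.items.foldl (fun res pi =>
        L.items.foldl (fun res pj =>
          pvAddA res (pi.1 + pj.1) (pvCrossA aN pi.2 pj.2)) res)
        PySem.Dict.empty).items := by
  subst haN
  -- the double loop is the fold of pvAddA over the flattened action list
  have hdouble : R.items.foldl (fun res pi =>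
        L.items.foldl (fun res pj =>
          pvAddA res (pi.1 + pj.1) (pvCrossA X.length pi.2 pj.2)) res)
        PySem.Dict.empty =
      (R.items.flatMap (fun pi => L.items.map (fun pj =>
          (pi.1 + pj.1, pvCrossA X.length pi.2 pj.2)))).foldl
        (fun r a => pvAddA r a.1 a.2) PySem.Dict.empty := by
    rw [List.foldl_flatMap]
    congr 1
    funext acc pi
    rw [List.foldl_map]
  rw [hdouble]
  set acts := R.items.flatMap (fun pi => L.items.map (fun pj =>
      (pi.1 + pj.1, pvCrossA X.length pi.2 pj.2))) with hacts
  obtain ⟨hitems, hknd⟩ := foldl_pvAddA_items acts PySem.Dict.empty (by decide)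
  have hempt : (PySem.Dict.empty : PySem.Dict Int (List Int)).items = [] := rfl
  refine ⟨hknd, ?_, ?_⟩
  · -- keys
    rw [hitems, dApply_keys, hempt]
    have hactk : acts.map Prod.fst = (R.items.map Prod.fst).flatMap
        (fun i => (L.items.map Prod.fst).map (fun j => i + j)) := by
      rw [hacts]
      simp [List.map_flatMap, List.flatMap_map, List.map_map, Function.comp_def]
    show PySem.Set.update [] (acts.map Prod.fst) = PySem.Set.ofList (seqK (X ++ Y))
    rw [show (PySem.Set.update [] (acts.map Prod.fst)) =
      PySem.Set.ofList (acts.map Prod.fst) from PySem.Set.update_empty _]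
    rw [hactk, hRrep.1, hLrep.1, pv_ofList_flatMap_ofList,
      pv_ofList_flatMap_congr (fun i _ =>
        pv_ofList_map_ofList (fun a b h => by omega) (seqK X)),
      ← seqK_combine]
  · -- values
    intro p hp
    rw [hitems, hempt] at hp
    have hvnd : p.2.Nodup := dApply_vals_nodup acts [] (by simp) p hp
    refine ⟨hvnd, ?_⟩
    intro x
    have hkeysnd : ((dApply [] acts).map Prod.fst).Nodup := by
      rw [← hempt, ← hitems, ← pv_keys_eq]; exact hknd
    have hx : x ∈ p.2 ↔ ∃ v, (p.1, v) ∈ dApply [] acts ∧ x ∈ v := by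
      constructor
      · intro h; exact ⟨p.2, by rwa [Prod.mk.eta], h⟩
      · rintro ⟨v, hv, hxv⟩
        have hp2 : (p.1, p.2) ∈ dApply [] acts := by rwa [Prod.mk.eta]
        rw [pv_key_unique hkeysnd hp2 hv]
        exact hxv
    rw [hx, dApply_lookup]
    simp only [List.not_mem_nil, false_and, exists_const, false_or]
    have hpos : 0 < 2 ^ X.length := Nat.two_pow_pos _
    constructor
    · rintro ⟨a, ha, hak, hxa⟩
      rw [hacts] at ha
      obtain ⟨pi, hpi, hain⟩ := List.mem_flatMap.mp ha
      obtain ⟨pj, hpj, rfl⟩ := List.mem_map.mp hain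
      simp only at hak
      obtain ⟨k, hk, hxk⟩ := List.mem_flatMap.mp hxa
      obtain ⟨l, hl, rfl⟩ := List.mem_map.mp hxk
      obtain ⟨ku, hku, hksum, rfl⟩ := ((hRrep.2 pi hpi).2 k).mp hk
      obtain ⟨lv, hlv, hlsum, rfl⟩ := ((hLrep.2 pj hpj).2 l).mp hl
      refine ⟨ku * 2 ^ X.length + lv, ?_, ?_, ?_⟩
      · simp only [List.length_append, pow_add]
        calc ku * 2 ^ X.length + lv < ku * 2 ^ X.length + 2 ^ X.length := by omega
          _ = (ku + 1) * 2 ^ X.length := by ring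
          _ ≤ 2 ^ Y.length * 2 ^ X.length := Nat.mul_le_mul_right _ (by omega)
          _ = 2 ^ X.length * 2 ^ Y.length := by ring
      · rw [mSum_split X Y ku lv hlv, hksum, hlsum, ← hak]
        ring
      · rw [Int.shiftLeft_eq]
        push_cast
        ring
    · rintro ⟨m, hm, hms, rfl⟩
      set ku := m / 2 ^ X.length with hkudef
      set lv := m % 2 ^ X.length with hlvdef
      have hlv : lv < 2 ^ X.length := Nat.mod_lt _ hpos
      have hku : ku < 2 ^ Y.length := by
        rw [hkudef, Nat.div_lt_iff_lt_mul hpos]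
        simp only [List.length_append, pow_add] at hm
        calc m < 2 ^ X.length * 2 ^ Y.length := hm
          _ = 2 ^ Y.length * 2 ^ X.length := by ring
      obtain ⟨vR, hvR⟩ := pv_entry_exists (s := mSum Y ku)
        (by rw [hRrep.1, PySem.Set.mem_ofList]; exact mSum_mem_seqK Y ku hku)
      obtain ⟨vL, hvL⟩ := pv_entry_exists (s := mSum X lv)
        (by rw [hLrep.1, PySem.Set.mem_ofList]; exact mSum_mem_seqK X lv hlv)
      have hmdecomp : m = ku * 2 ^ X.length + lv := by
        rw [hkudef, hlvdef, Nat.mul_comm]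
        exact (Nat.div_add_mod m _).symm
      refine ⟨(mSum Y ku + mSum X lv, pvCrossA X.length vR vL), ?_, ?_, ?_⟩
      · rw [hacts]
        exact List.mem_flatMap.mpr ⟨(mSum Y ku, vR), hvR,
          List.mem_map.mpr ⟨(mSum X lv, vL), hvL, rfl⟩⟩
      · simp only
        rw [← hms, hmdecomp, mSum_split X Y ku lv hlv]
        ring
      · show ((m : Nat) : Int) ∈ pvCrossA X.length vR vL
        apply List.mem_flatMap.mpr
        refine ⟨(ku : Int), ((hRrep.2 _ hvR).2 _).mpr ⟨ku, hku, rfl, rfl⟩, ?_⟩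
        apply List.mem_map.mpr
        refine ⟨(lv : Int), ((hLrep.2 _ hvL).2 _).mpr ⟨lv, hlv, rfl, rfl⟩, ?_⟩
        rw [Int.shiftLeft_eq, hmdecomp]
        push_cast
        ring


theorem pvFA_rep (fuel : Nat) : ∀ (W : List Int) (n : Int), W ≠ [] → W.length ≤ fuel →
    pvPreT W.length n → n.toNat ≤ 2 ^ 31 →
    (pvFA fuel W n).keys.Nodup ∧ pvRep W (pvFA fuel W n).items := by
  induction fuel with
  | zero =>
    intro W n hne hle _ _
    exact absurd (List.length_eq_zero_iff.mp (Nat.le_zero.mp hle)) hne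
  | succ f ih =>
    intro W n hne hle hT hsmall
    by_cases h1 : W.length = 1
    · -- base case of the recursion (n is not used by the Python here)
      obtain ⟨w, rfl⟩ := List.length_eq_one_iff.mp h1
      rw [pvFA]
      simp only [List.length_singleton, if_true, PySem.List.pyGetD_zero_cons]
      by_cases hw : w = 0
      · subst hw
        simp only [if_true]
        refine ⟨by decide, by decide, ?_⟩
        intro p hp
        have hp2 : p ∈ [((0 : Int), [(0 : Int), 1])] := hp
        have hp' : p = ((0 : Int), [(0 : Int), 1]) := by simpa using hp2
        subst hp'
        refine ⟨by decide, ?_⟩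
        intro x
        simp only [List.mem_cons, List.not_mem_nil, or_false]
        constructor
        · rintro (rfl | rfl)
          · exact ⟨0, by norm_num, by norm_num [mSum], rfl⟩
          · exact ⟨1, by norm_num, by norm_num [mSum], rfl⟩
        · rintro ⟨m, hm, _, rfl⟩
          simp only [List.length_singleton, pow_one] at hm
          rcases (by omega : m = 0 ∨ m = 1) with rfl | rfl
          · exact Or.inl rfl
          · exact Or.inr rfl
      · simp only [hw, if_false]
        have hdict : PySem.Dict.ofList [((0 : Int), [(0 : Int)]), (w, [1])] =
            ((PySem.Dict.empty.insert 0 [0]).insert w [1]) := rfl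
        have hc0 : (PySem.Dict.empty.insert (0 : Int) [(0 : Int)]).contains w = false := by
          rw [PySem.Dict.contains_insert]
          simp [hw, PySem.Dict.contains_empty]
        have hitems : (PySem.Dict.ofList [((0 : Int), [(0 : Int)]), (w, [1])]).items =
            [((0 : Int), [(0 : Int)]), (w, [1])] := by
          rw [hdict, PySem.Dict.items_insert_of_not_contains _ _ hc0]
          rfl
        have hseq : seqK [w] = [0, w] := by
          show (List.range 2).map (mSum [w]) = [0, w]
          rw [show List.range 2 = [0, 1] by decide]
          simp [mSum]
        have hkeys : (PySem.Dict.ofList [((0 : Int), [(0 : Int)]), (w, [1])]).keys = [0, w] := by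
          rw [pv_keys_eq, hitems]; rfl
        refine ⟨by rw [hkeys]; simp [Ne.symm hw], ?_, ?_⟩
        · rw [hitems, hseq]
          have hnd2 : ([0, w] : List Int).Nodup := by
            simp [eq_comm, hw]
          exact (PySem.Set.ofList_eq_self_of_nodup _ hnd2).symm
        · rw [hitems]
          intro p hp
          rcases List.mem_cons.mp hp with rfl | hp'
          · refine ⟨by decide, ?_⟩
            intro x
            simp only [List.mem_singleton]
            constructor
            · rintro rfl
              exact ⟨0, by norm_num, by norm_num [mSum], rfl⟩
            · rintro ⟨m, hm, hms, rfl⟩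
              simp only [List.length_singleton, pow_one] at hm
              rcases (by omega : m = 0 ∨ m = 1) with rfl | rfl
              · rfl
              · exfalso; apply hw; simpa [mSum] using hms
          · have hp'' : p = (w, [1]) := by simpa using hp'
            subst hp''
            refine ⟨by simp, ?_⟩
            intro x
            simp only [List.mem_singleton]
            constructor
            · rintro rfl
              exact ⟨1, by norm_num, by norm_num [mSum], rfl⟩
            · rintro ⟨m, hm, hms, rfl⟩
              simp only [List.length_singleton, pow_one] at hm
              rcases (by omega : m = 0 ∨ m = 1) with rfl | rfl
              · exfalso; apply hw; simpa [mSum] using hms.symm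
              · rfl
    · -- recursive case: the split is at h = n//2 and (when A terminates) the left slice
      -- has exactly h elements, so the shift h is the left length
      rcases hT with h1' | ⟨hlen2, hlenn, i, hi65, hleneq⟩
      · exact absurd h1' h1
      have hi65' : i < 65 := List.mem_range.mp hi65
      set N := n.toNat with hNdef
      have hN2 : 2 ≤ N := by
        have : (2 : Int) ≤ n := le_trans (by exact_mod_cast hlen2) hlenn
        omega
      have hNn : (N : Int) = n := by omega
      have hlenN : W.length ≤ N := by
        have := hlenn; omega
      -- i = 0 would force a singleton
      have hipos : 1 ≤ i := by
        rcases Nat.eq_zero_or_pos i with rfl | h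
        · exfalso
          simp only [pow_zero, Nat.div_one] at hleneq
          omega
        · exact h
      set d := (N - 1) / 2 ^ i with hddef
      set M := N - N / 2 with hMdef
      have hM1 : M - 1 = (N - 1) / 2 := by omega
      have hdM : d = (M - 1) / 2 ^ (i - 1) := by
        rw [hM1, hddef, Nat.div_div_eq_div_mul]
        congr 1
        rw [← pow_succ']
        congr 1
        omega
      have hdle : d ≤ M - 1 := by
        rw [hdM]; exact Nat.div_le_self _ _
      have hh1 : 1 ≤ N / 2 := by omega
      have hhlen : N / 2 ≤ W.length - 1 := by omega
      set a := N / 2 with hadef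
      have hfd : PySem.Int.floordiv n 2 = ((a : Nat) : Int) := by
        rw [← hNn]
        exact_mod_cast PySem.Int.floordiv_natCast N 2
      have hs1 : PySem.List.slice W none (some ((a : Nat) : Int)) = W.take a :=
        PySem.List.slice_to_natCast W a
      have hs2 : PySem.List.slice W (some ((a : Nat) : Int)) none = W.drop a :=
        PySem.List.slice_from_natCast W a
      have htl : (W.take a).length = a := by rw [List.length_take]; omega
      have hdl : (W.drop a).length = W.length - a := by rw [List.length_drop]
      have htne : W.take a ≠ [] := by
        intro h; have h2 := congrArg List.length h; rw [htl] at h2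
        simp only [List.length_nil] at h2; omega
      have hdne : W.drop a ≠ [] := by
        intro h; have h2 := congrArg List.length h; rw [hdl] at h2
        simp only [List.length_nil] at h2; omega
      -- preconditions of the two recursive calls
      have hTleft : pvPreT (W.take a).length ((a : Nat) : Int) := by
        rw [htl]
        rcases Nat.eq_or_lt_of_le hh1 with h | h
        · exact Or.inl h.symm
        · refine Or.inr ⟨by omega, by omega, 31, by simp, ?_⟩
          have htn : ((a : Nat) : Int).toNat = a := Int.toNat_natCast a
          rw [htn]
          have hz : (a - 1) / 2 ^ 31 = 0 := Nat.div_eq_of_lt (by omega)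
          omega
      have hTright : pvPreT (W.drop a).length ((M : Nat) : Int) := by
        rw [hdl]
        have hlr : W.length - a = M - d := by omega
        rcases Nat.eq_or_lt_of_le (show 1 ≤ W.length - a by omega) with h | h
        · exact Or.inl h.symm
        · refine Or.inr ⟨by omega, by rw [hlr]; exact_mod_cast Nat.sub_le M d, i - 1, by simp; omega, ?_⟩
          have htn : ((M : Nat) : Int).toNat = M := Int.toNat_natCast M
          rw [htn, hlr, hdM]
      have hLrec := ih (W.take a) ((a : Nat) : Int) htne (by omega) hTleft
        (by rw [Int.toNat_natCast]; omega)
      have hRrec := ih (W.drop a) ((M : Nat) : Int) hdne (by omega) hTright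
        (by rw [Int.toNat_natCast]; omega)
      rw [pvFA]
      simp only [h1, if_false]
      rw [hfd, hs1, hs2]
      have hcast2 : n - ((a : Nat) : Int) = ((M : Nat) : Int) := by omega
      rw [hcast2]
      rw [show ((((a : Nat) : Int)).toNat) = a from Int.toNat_natCast a]
      have hcomb := combA_rep (W.take a) (W.drop a) a htl.symm
        (pvFA f (W.take a) ((a : Nat) : Int))
        (pvFA f (W.drop a) ((M : Nat) : Int))
        hLrec.2 hRrec.2
      rw [List.take_append_drop] at hcomb
      exact hcomb

-- ===== VERDICT (by name: the statement is the Claim_ definition above) =====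
theorem f_spec : Claim_equal_f := by
  intro W n hdom hpre
  obtain ⟨hne, hT⟩ := hpre
  have hsmall : n.toNat ≤ 2 ^ 31 := by
    unfold Dom_f at hdom
    simp only [Bool.and_eq_true, pvDomInt, decide_eq_true_eq] at hdom
    omega
  unfold Spec_f f f_alt
  have hA := pvFA_rep W.length W n hne le_rfl hT hsmall
  have hB := foldB_rep W
  rw [rep_out W _ hA.2, rep_out W _ hB.2]
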